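-- pv_equiv track=rewrite | github.com/sricharanbattu/ML_assignments2020 | 17EC10009_ML_A3/src/partB.py | modified
-- ===== SOURCE A (Python) =====
-- def modified(clusterlist):
--     """
--     This function takes as  arguments:
--         1. The list of clusters each element containing a list of indices:cluster_matrix
--     This function arranges the list of clusters, based on the first element
--     of ordered clusters.
--     """
--     arr=[]
--     sh=len(clusterlist)
--     for i in range(0,sh):
--         arr.append(sorted(clusterlist[i]))
--
--     arr1=[]
--     for i in range(0,sh):
--         x=arr[i]
--         lis=[i,x[0]]
--         arr1.append(lis)
--     arr1.sort(key=lambda lis:lis[1])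
--
--     arr2=[]
--     for i in range(0,sh):
--         arr2.append(arr[arr1[i][0]])
--     return arr2
-- ===== SOURCE B (Python) =====
-- def modified(clusterlist):
--     """
--     This function takes as  arguments:
--         1. The list of clusters each element containing a list of indices:cluster_matrix
--     This function arranges the list of clusters, based on the first element
--     of ordered clusters.
--     """
--     # Stable selection sort: repeatedly extract the first cluster with the
--     # smallest leading element (clusters are sorted up front), no library
--     # sort of the cluster list and no index table.
--     remaining = [sorted(c) for c in clusterlist]
--     out = []
--     while remaining:
--         best = 0
--         for j in range(1, len(remaining)):
--             if remaining[j][0] < remaining[best][0]: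
--                 best = j
--         out.append(remaining.pop(best))
--     return out
-- ===== Notes on version B (the rewrite author's own statement) =====
-- stated objective: alternative
-- what changed: Replaces A's three-pass library-sort scheme (sort each cluster into a table, build [index, first-element] pairs, sort the pairs, gather by index) with a stable selection sort: repeatedly scan the remaining clusters for the first one with the smallest leading element and pop it onto the output.
-- outside the precondition, e.g. on modified([[2], []]): A raises IndexError, B raises IndexError; on modified([[]]): A raises IndexError, B returns [[]]
import Mathlib
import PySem

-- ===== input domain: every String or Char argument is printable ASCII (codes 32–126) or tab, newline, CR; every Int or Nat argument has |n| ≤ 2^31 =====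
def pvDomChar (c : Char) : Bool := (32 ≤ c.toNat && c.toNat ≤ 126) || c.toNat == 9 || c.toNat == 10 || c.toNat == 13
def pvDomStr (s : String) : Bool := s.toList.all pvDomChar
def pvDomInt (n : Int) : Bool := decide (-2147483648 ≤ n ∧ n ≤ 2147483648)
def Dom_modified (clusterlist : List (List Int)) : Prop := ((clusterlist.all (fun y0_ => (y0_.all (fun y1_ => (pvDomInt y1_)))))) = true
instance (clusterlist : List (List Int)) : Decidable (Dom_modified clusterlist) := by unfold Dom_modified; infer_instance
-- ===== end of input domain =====

-- B replaces A's sort-each / build-index-pairs / library-sort / gather scheme by a stable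
-- selection sort: repeatedly extract the first remaining cluster with the smallest leading
-- element (alternative decomposition; no library sort of the cluster list, no index table).

-- ===== PORT A =====
def modified (clusterlist : List (List Int)) : List (List Int) :=
  let sh : Int := PySem.List.len clusterlist
  let arr : List (List Int) :=
    (PySem.List.pyRange 0 sh 1).foldl
      (fun acc i => acc ++ [PySem.List.sorted (PySem.List.pyGetD clusterlist i []) (fun x => x) false]) []
  let arr1 : List (Int × Int) :=
    (PySem.List.pyRange 0 sh 1).foldl
      (fun acc i => acc ++ [(i, PySem.List.pyGetD (PySem.List.pyGetD arr i []) 0 0)]) []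
  let arr1s : List (Int × Int) := PySem.List.sorted arr1 (fun lis => lis.2) false
  (PySem.List.pyRange 0 sh 1).foldl
    (fun acc i => acc ++ [PySem.List.pyGetD arr (PySem.List.pyGetD arr1s i (0, 0)).1 []]) []

-- ===== PORT B =====
-- the key remaining[j][0] used by B's scan (default only makes pyGetD total; Pre_ excludes empty clusters)
def pvKey (c : List Int) : Int := PySem.List.pyGetD c 0 0

-- best = 0; for j in range(1, len(remaining)): if remaining[j][0] < remaining[best][0]: best = j
def pvBest (rem : List (List Int)) : Int :=
  (PySem.List.pyRange 1 (PySem.List.len rem) 1).foldl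
    (fun best j =>
      if PySem.List.pyGetD (PySem.List.pyGetD rem j []) 0 0
           < PySem.List.pyGetD (PySem.List.pyGetD rem best []) 0 0
      then j else best) 0

-- the same scan with an arbitrary right endpoint (pvBest rem = pvScan rem (len rem))
def pvScan (rem : List (List Int)) (t : Int) : Int :=
  (PySem.List.pyRange 1 t 1).foldl
    (fun best j =>
      if PySem.List.pyGetD (PySem.List.pyGetD rem j []) 0 0
           < PySem.List.pyGetD (PySem.List.pyGetD rem best []) 0 0
      then j else best) 0

-- spec of the scan: pvBest is the FIRST index of minimal key (needed by the port for termination)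
lemma pvBest_spec (rem : List (List Int)) (h : rem ≠ []) :
    (0 ≤ pvBest rem ∧ pvBest rem < (rem.length : Int))
    ∧ (∀ j : Int, 0 ≤ j → j < (rem.length : Int) →
        pvKey (PySem.List.pyGetD rem (pvBest rem) []) ≤ pvKey (PySem.List.pyGetD rem j []))
    ∧ (∀ j : Int, 0 ≤ j → j < pvBest rem →
        pvKey (PySem.List.pyGetD rem (pvBest rem) []) < pvKey (PySem.List.pyGetD rem j [])) := by
  have hn : (1 : Int) ≤ (rem.length : Int) := by
    have : rem.length ≠ 0 := fun h0 => h (List.length_eq_zero_iff.mp h0)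
    omega
  -- generalize the right endpoint of the scanned range
  suffices H : ∀ t : Int, 1 ≤ t → t ≤ (rem.length : Int) →
      (0 ≤ pvScan rem t ∧ pvScan rem t < t)
      ∧ (∀ j : Int, 0 ≤ j → j < t →
          pvKey (PySem.List.pyGetD rem (pvScan rem t) []) ≤ pvKey (PySem.List.pyGetD rem j []))
      ∧ (∀ j : Int, 0 ≤ j → j < pvScan rem t →
          pvKey (PySem.List.pyGetD rem (pvScan rem t) []) < pvKey (PySem.List.pyGetD rem j [])) by
    have := H (rem.length : Int) hn le_rfl
    have hb : pvBest rem = pvScan rem (rem.length : Int) := by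
      simp [pvBest, pvScan, PySem.List.len_eq]
    rw [hb]
    exact ⟨⟨this.1.1, this.1.2⟩, this.2.1, this.2.2⟩
  intro t ht
  induction t, ht using Int.le_induction with
  | base =>
    intro _
    have : pvScan rem 1 = 0 := by simp [pvScan, PySem.List.pyRange_one_eq_nil (le_refl (1 : Int))]
    rw [this]
    refine ⟨⟨le_rfl, by omega⟩, ?_, ?_⟩
    · intro j hj0 hj1; have : j = 0 := by omega
      subst this; exact le_rfl
    · intro j hj0 hj1; omega
  | succ t ht1 ih =>
    intro htl
    have ihh := ih (by omega)
    set B := pvScan rem t with hB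
    have hstep : pvScan rem (t + 1)
        = (if pvKey (PySem.List.pyGetD rem t []) < pvKey (PySem.List.pyGetD rem B []) then t else B) := by
      rw [pvScan, PySem.List.pyRange_one_succ_right (by omega : (1:Int) ≤ t), List.foldl_append]
      simp [pvScan, pvKey, hB]
    rw [hstep]
    by_cases hc : pvKey (PySem.List.pyGetD rem t []) < pvKey (PySem.List.pyGetD rem B [])
    · rw [if_pos hc]
      refine ⟨⟨by omega, by omega⟩, ?_, ?_⟩
      · intro j hj0 hjt
        rcases lt_or_ge j t with hlt | hge
        · exact le_of_lt (lt_of_lt_of_le hc (ihh.2.1 j hj0 hlt))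
        · have : j = t := by omega
          subst this; exact le_rfl
      · intro j hj0 hjt
        exact lt_of_lt_of_le hc (ihh.2.1 j hj0 hjt)
    · rw [if_neg hc]
      refine ⟨⟨ihh.1.1, by omega⟩, ?_, ihh.2.2⟩
      intro j hj0 hjt
      rcases lt_or_ge j t with hlt | hge
      · exact ihh.2.1 j hj0 hlt
      · have : j = t := by omega
        subst this; exact le_of_not_gt hc

-- the popped index is in range (termination of the loop below)
lemma pvBest_toNat_lt (rem : List (List Int)) (h : rem ≠ []) :
    (pvBest rem).toNat < rem.length := by
  have hs := (pvBest_spec rem h).1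
  omega

-- while remaining: best = …scan…; out.append(remaining.pop(best))
-- pop(best) with 0 ≤ best < len (pvBest_spec) is exactly eraseIdx best.toNat + read at best
def pvSelLoop (rem out : List (List Int)) : List (List Int) :=
  match rem with
  | [] => out
  | x :: rest =>
    pvSelLoop ((x :: rest).eraseIdx (pvBest (x :: rest)).toNat)
              (out ++ [PySem.List.pyGetD (x :: rest) (pvBest (x :: rest)) []])
termination_by rem.length
decreasing_by
  have h1 := pvBest_toNat_lt (x :: rest) (by simp)
  simp only [List.length_eraseIdx, List.length_cons] at *
  split <;> omega

def modified_alt (clusterlist : List (List Int)) : List (List Int) :=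
  pvSelLoop (clusterlist.map (fun c => PySem.List.sorted c (fun x => x) false)) []

-- ===== PRECONDITION & SPEC =====
-- Pre_ excludes lists containing an empty cluster: there A raises IndexError (x[0]), and B
-- raises too except in the accidental one-empty-cluster corner where its scan never indexes.
def Pre_modified (clusterlist : List (List Int)) : Prop := ∀ c ∈ clusterlist, c ≠ []
instance (clusterlist : List (List Int)) : Decidable (Pre_modified clusterlist) := by unfold Pre_modified; infer_instance
def pvWitness_modified : List (List Int) := [[3, 1], [2], [0, 5]]
def Spec_modified (clusterlist : List (List Int)) (out : List (List Int)) : Prop := out = modified_alt clusterlist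
instance (clusterlist : List (List Int)) (out : List (List Int)) : Decidable (Spec_modified clusterlist out) := by unfold Spec_modified; infer_instance

-- ===== CLAIM (what is proved, stated in full; the proofs are below) =====
def Claim_equal_modified : Prop := ∀ (clusterlist : List (List Int)), Dom_modified clusterlist → Pre_modified clusterlist → Spec_modified clusterlist (modified clusterlist)

-- ===== LEMMAS AND PROOFS =====

-- mapping commutes with a single stable insertion when the comparison is preserved by f
lemma pv_map_insertBy {α β : Type} (f : α → β) (b1 : α → α → Bool) (b2 : β → β → Bool)
    (x : α) (ys : List α) (h : ∀ y ∈ ys, b2 (f x) (f y) = b1 x y) :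
    (PySem.List.insertBy b1 x ys).map f = PySem.List.insertBy b2 (f x) (ys.map f) := by
  induction ys with
  | nil => rfl
  | cons y ys ih =>
    simp only [PySem.List.insertBy, List.map]
    rw [h y (by simp)]
    by_cases hb : b1 x y
    · simp [hb]
    · simp only [hb, if_neg, Bool.false_eq_true, not_false_eq_true, List.map]
      rw [ih (fun z hz => h z (by simp [hz]))]

-- mapping commutes with the insertion-sort fold when f preserves the key
lemma pv_map_foldl_insertBy {α β : Type} (f : α → β) (k1 : α → Int) (k2 : β → Int)
    (ps acc : List α) (h : ∀ p, (p ∈ ps ∨ p ∈ acc) → k2 (f p) = k1 p) :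
    (ps.foldl (fun a x => PySem.List.insertBy (fun u v => decide (k1 u < k1 v)) x a) acc).map f
    = (ps.map f).foldl (fun a x => PySem.List.insertBy (fun u v => decide (k2 u < k2 v)) x a) (acc.map f) := by
  induction ps generalizing acc with
  | nil => rfl
  | cons p ps ih =>
    simp only [List.foldl, List.map]
    rw [ih (PySem.List.insertBy (fun u v => decide (k1 u < k1 v)) p acc)
        (fun q hq => by
          rcases hq with hq | hq
          · exact h q (Or.inl (List.mem_cons_of_mem _ hq))
          · rcases (PySem.List.mem_insertBy _ _ _ _).1 hq with rfl | hq
            · exact h q (Or.inl (List.mem_cons_self ..))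
            · exact h q (Or.inr hq)),
      pv_map_insertBy f (fun u v => decide (k1 u < k1 v)) (fun u v => decide (k2 u < k2 v)) p acc
        (fun y hy => by
          show decide (k2 (f p) < k2 (f y)) = decide (k1 p < k1 y)
          rw [h p (Or.inl (List.mem_cons_self ..)), h y (Or.inr hy)])]

-- mapping commutes with a stable keyed sort when f preserves the key on the list
lemma pv_map_sorted {α β : Type} (f : α → β) (k1 : α → Int) (k2 : β → Int) (ps : List α)
    (h : ∀ p ∈ ps, k2 (f p) = k1 p) :
    (PySem.List.sorted ps k1 false).map f = PySem.List.sorted (ps.map f) k2 false := by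
  rw [PySem.List.sorted_eq_foldl_insertBy, PySem.List.sorted_eq_foldl_insertBy]
  exact pv_map_foldl_insertBy f k1 k2 ps []
    (fun p hp => h p (hp.resolve_right (by simp)))

-- A computes the stable keyed sort of the per-cluster sorts (this is the old three-pass analysis)
lemma pv_modified_eq_sorted (clusterlist : List (List Int)) :
    modified clusterlist
    = PySem.List.sorted (clusterlist.map (fun c => PySem.List.sorted c (fun x => x) false))
        pvKey false := by
  unfold modified pvKey
  simp only [PySem.List.foldl_append_singleton_eq_map, List.nil_append, PySem.List.len_eq]
  have harr :
      (PySem.List.pyRange 0 (clusterlist.length : Int) 1).map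
        (fun i => PySem.List.sorted (PySem.List.pyGetD clusterlist i []) (fun x => x) false)
      = clusterlist.map (fun c => PySem.List.sorted c (fun x => x) false) := by
    have := PySem.List.map_pyGetD_pyRange_zero' clusterlist ([] : List Int)
    calc (PySem.List.pyRange 0 (clusterlist.length : Int) 1).map
          (fun i => PySem.List.sorted (PySem.List.pyGetD clusterlist i []) (fun x => x) false)
        = ((PySem.List.pyRange 0 (clusterlist.length : Int) 1).map
            (fun i => PySem.List.pyGetD clusterlist i [])).map
            (fun c => PySem.List.sorted c (fun x => x) false) := by
          rw [List.map_map]; rfl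
      _ = _ := by rw [this]
  rw [harr]
  set A := clusterlist.map (fun c => PySem.List.sorted c (fun x => x) false) with hA
  have hlenA : A.length = clusterlist.length := by simp [hA]
  have harr1 :
      (PySem.List.pyRange 0 (clusterlist.length : Int) 1).map
        (fun i => (i, PySem.List.pyGetD (PySem.List.pyGetD A i []) 0 0))
      = (PySem.List.enumerate A 0).map (fun p => (p.1, PySem.List.pyGetD p.2 0 0)) := by
    rw [PySem.List.enumerate_eq_map_pyRange A ([] : List Int), List.map_map,
        PySem.List.len_eq, hlenA]
    rfl
  rw [harr1]
  have hsortpairs :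
      PySem.List.sorted ((PySem.List.enumerate A 0).map (fun p => (p.1, PySem.List.pyGetD p.2 0 0)))
        (fun lis => lis.2) false
      = (PySem.List.sorted (PySem.List.enumerate A 0) (fun p => PySem.List.pyGetD p.2 0 0) false).map
          (fun p => (p.1, PySem.List.pyGetD p.2 0 0)) := by
    exact (pv_map_sorted (fun p : Int × List Int => (p.1, PySem.List.pyGetD p.2 0 0))
        (fun p : Int × List Int => PySem.List.pyGetD p.2 0 0) (fun lis : Int × Int => lis.2)
        (PySem.List.enumerate A 0) (fun p _ => rfl)).symm
  rw [hsortpairs]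
  set S := PySem.List.sorted (PySem.List.enumerate A 0) (fun p => PySem.List.pyGetD p.2 0 0) false with hS
  have hlenS : S.length = clusterlist.length := by
    rw [hS, PySem.List.length_sorted, PySem.List.length_enumerate, hlenA]
  have hgather :
      (PySem.List.pyRange 0 (clusterlist.length : Int) 1).map
        (fun i => PySem.List.pyGetD A
          (PySem.List.pyGetD (S.map (fun p => (p.1, PySem.List.pyGetD p.2 0 0))) i ((0 : Int), (0 : Int))).1 [])
      = S.map (fun p => PySem.List.pyGetD A p.1 []) := by
    have hlenM : ((S.map (fun p => (p.1, PySem.List.pyGetD p.2 0 0))).length : Int)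
        = (clusterlist.length : Int) := by simp [hlenS]
    calc (PySem.List.pyRange 0 (clusterlist.length : Int) 1).map
          (fun i => PySem.List.pyGetD A
            (PySem.List.pyGetD (S.map (fun p => (p.1, PySem.List.pyGetD p.2 0 0))) i ((0 : Int), (0 : Int))).1 [])
        = ((PySem.List.pyRange 0 (clusterlist.length : Int) 1).map
            (fun i => PySem.List.pyGetD (S.map (fun p => (p.1, PySem.List.pyGetD p.2 0 0))) i ((0 : Int), (0 : Int)))).map
            (fun q => PySem.List.pyGetD A q.1 []) := by rw [List.map_map]; rfl
      _ = (S.map (fun p => (p.1, PySem.List.pyGetD p.2 0 0))).map (fun q => PySem.List.pyGetD A q.1 []) := by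
          rw [← hlenM, PySem.List.map_pyGetD_pyRange_zero']
      _ = S.map (fun p => PySem.List.pyGetD A p.1 []) := by rw [List.map_map]; rfl
  rw [hgather]
  have hmem : ∀ p ∈ S, PySem.List.pyGetD A p.1 [] = p.2 := by
    intro p hp
    rw [hS, PySem.List.mem_sorted] at hp
    rcases (PySem.List.mem_enumerate_iff ..).1 hp with ⟨k, hk, rfl⟩
    simpa using PySem.List.pyGetD_ofNat (xs := A) (n := k) (d := ([] : List Int)) (by simpa using hk)
  rw [List.map_congr_left hmem]
  rw [pv_map_sorted (fun p : Int × List Int => p.2)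
      (fun p : Int × List Int => PySem.List.pyGetD p.2 0 0) (fun c : List Int => PySem.List.pyGetD c 0 0)
      (PySem.List.enumerate A 0) (fun p _ => rfl),
    PySem.List.map_snd_enumerate]

-- inserting a strictly smaller element lands at the front
lemma pv_insertBy_front {α : Type} (key : α → Int) (m : α) (L : List α)
    (h : ∀ y ∈ L, key m < key y) :
    PySem.List.insertBy (fun a b => decide (key a < key b)) m L = m :: L := by
  cases L with
  | nil => rfl
  | cons y ys =>
    simp only [PySem.List.insertBy]
    rw [if_pos (by simpa using h y (by simp))]

-- a minimal head is never displaced by the insertion fold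
lemma pv_foldl_insertBy_cons {α : Type} (key : α → Int) (m : α) (s : List α)
    (h : ∀ y ∈ s, key m ≤ key y) : ∀ acc : List α,
    s.foldl (fun a x => PySem.List.insertBy (fun u v => decide (key u < key v)) x a) (m :: acc)
    = m :: s.foldl (fun a x => PySem.List.insertBy (fun u v => decide (key u < key v)) x a) acc := by
  induction s with
  | nil => intro acc; rfl
  | cons y ys ih =>
    intro acc
    simp only [List.foldl]
    have hy : key m ≤ key y := h y (by simp)
    have : PySem.List.insertBy (fun u v => decide (key u < key v)) y (m :: acc)
        = m :: PySem.List.insertBy (fun u v => decide (key u < key v)) y acc := by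
      simp only [PySem.List.insertBy]
      rw [if_neg (by simpa using not_lt.mpr hy)]
    rw [this, ih (fun z hz => h z (by simp [hz]))]

-- selection step on the stable sort: the first strict minimum comes out first
lemma pv_sorted_select {α : Type} (key : α → Int) (p s : List α) (m : α)
    (hp : ∀ y ∈ p, key m < key y) (hs : ∀ y ∈ s, key m ≤ key y) :
    PySem.List.sorted (p ++ m :: s) key false = m :: PySem.List.sorted (p ++ s) key false := by
  rw [PySem.List.sorted_eq_foldl_insertBy, PySem.List.sorted_eq_foldl_insertBy,
      List.foldl_append, List.foldl_append]
  simp only [List.foldl]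
  have hmemp : ∀ y ∈ p.foldl (fun a x => PySem.List.insertBy (fun u v => decide (key u < key v)) x a) [], key m < key y := by
    intro y hy
    apply hp
    rw [← PySem.List.sorted_eq_foldl_insertBy] at hy
    exact (PySem.List.mem_sorted ..).1 hy
  rw [pv_insertBy_front key m _ hmemp, pv_foldl_insertBy_cons key m s hs]

-- the eraseIdx form of the selection step, at the first index of minimal key
lemma pv_sorted_eraseIdx {α : Type} (key : α → Int) (xs : List α) (b : Nat) (hb : b < xs.length)
    (hmin : ∀ j (hj : j < xs.length), key xs[b] ≤ key xs[j])
    (hstrict : ∀ j (hj : j < xs.length), j < b → key xs[b] < key xs[j]) :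
    PySem.List.sorted xs key false = xs[b] :: PySem.List.sorted (xs.eraseIdx b) key false := by
  have hsplit : xs = xs.take b ++ xs[b] :: xs.drop (b + 1) := by
    conv_lhs => rw [← List.take_append_drop b xs]
    rw [List.drop_eq_getElem_cons hb]
  have herase : xs.eraseIdx b = xs.take b ++ xs.drop (b + 1) :=
    List.eraseIdx_eq_take_drop_succ xs b
  rw [herase]
  conv_lhs => rw [hsplit]
  apply pv_sorted_select
  · intro y hy
    rw [List.mem_take_iff_getElem] at hy
    rcases hy with ⟨j, hj, rfl⟩
    have hjb : j < b := lt_of_lt_of_le hj (min_le_left ..)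
    have hjl : j < xs.length := lt_of_lt_of_le hj (min_le_right ..)
    exact hstrict j hjl hjb
  · intro y hy
    rw [List.mem_drop_iff_getElem] at hy
    rcases hy with ⟨j, hj, rfl⟩
    exact hmin (b + 1 + j) (by omega)

-- the selection loop computes the stable keyed sort
lemma pv_selLoop_eq : ∀ (n : Nat) (rem out : List (List Int)), rem.length = n →
    pvSelLoop rem out = out ++ PySem.List.sorted rem pvKey false := by
  intro n
  induction n using Nat.strong_induction_on with
  | _ n ih =>
    intro rem out hlen
    match rem with
    | [] => rw [pvSelLoop.eq_def]; simp [PySem.List.sorted_eq_foldl_insertBy]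
    | x :: rest =>
      rw [pvSelLoop.eq_def]
      show pvSelLoop ((x :: rest).eraseIdx (pvBest (x :: rest)).toNat)
             (out ++ [PySem.List.pyGetD (x :: rest) (pvBest (x :: rest)) []])
           = out ++ PySem.List.sorted (x :: rest) pvKey false
      have hne : (x :: rest : List (List Int)) ≠ [] := by simp
      have hspec := pvBest_spec (x :: rest) hne
      set rem := (x :: rest : List (List Int)) with hrem
      set b : Nat := (pvBest rem).toNat with hbn
      have hblt : b < rem.length := by have := hspec.1; omega
      have hcast : ((b : Nat) : Int) = pvBest rem := by have := hspec.1.1; omega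
      have hget : PySem.List.pyGetD rem (pvBest rem) [] = rem[b] := by
        rw [← hcast]; exact PySem.List.pyGetD_ofNat rem b [] hblt
      have hmin : ∀ j (hj : j < rem.length), pvKey rem[b] ≤ pvKey rem[j] := by
        intro j hj
        have := hspec.2.1 (j : Int) (by omega) (by omega)
        rwa [hget, PySem.List.pyGetD_ofNat rem j [] hj] at this
      have hstrict : ∀ j (hj : j < rem.length), j < b → pvKey rem[b] < pvKey rem[j] := by
        intro j hj hjb
        have := hspec.2.2 (j : Int) (by omega) (by omega)
        rwa [hget, PySem.List.pyGetD_ofNat rem j [] hj] at this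
      have hlen' : (rem.eraseIdx b).length = n - 1 := by
        rw [List.length_eraseIdx, if_pos hblt, hlen]
      have hn1 : n - 1 < n := by omega
      rw [ih (n - 1) hn1 (rem.eraseIdx b) (out ++ [PySem.List.pyGetD rem (pvBest rem) []]) hlen']
      rw [hget, pv_sorted_eraseIdx pvKey rem b hblt hmin hstrict]
      simp

-- ===== VERDICT (by name: the statement is the Claim_ definition above) =====
theorem modified_spec : Claim_equal_modified := by
  intro clusterlist _ _
  unfold Spec_modified modified_alt
  rw [pv_modified_eq_sorted,
      pv_selLoop_eq (clusterlist.map (fun c => PySem.List.sorted c (fun x => x) false)).length _ [] rfl,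
      List.nil_append]
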